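-- pv_equiv track=rewrite | github.com/dkyazzentwatwa/apple-flow | src/apple_flow/healer_tracker.py | _priority_from_labels
-- ===== SOURCE A (Python) =====
-- def _priority_from_labels(labels: list[str]) -> int:
--     lowered = {label.lower() for label in labels}
--     if "severity:critical" in lowered or "priority:p0" in lowered:
--         return 0
--     if "priority:p1" in lowered:
--         return 10
--     if "priority:p2" in lowered:
--         return 20
--     return 100
-- ===== SOURCE B (Python) =====
-- _PRIORITY_TABLE = {
--     "severity:critical": 0,
--     "priority:p0": 0,
--     "priority:p1": 10,
--     "priority:p2": 20,
-- }
--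
--
-- def _priority_from_labels(labels: list[str]) -> int:
--     best = 100
--     for label in labels:
--         best = min(best, _PRIORITY_TABLE.get(label.lower(), 100))
--     return best
-- ===== Notes on version B (the rewrite author's own statement) =====
-- stated objective: simpler
-- what changed: Replaces the set construction plus tiered early-return membership cascade by a single min-reduction over a dict lookup per lowercased label (default 100); strictly increasing tiers make the minimum equal to the cascade.
import Mathlib
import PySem

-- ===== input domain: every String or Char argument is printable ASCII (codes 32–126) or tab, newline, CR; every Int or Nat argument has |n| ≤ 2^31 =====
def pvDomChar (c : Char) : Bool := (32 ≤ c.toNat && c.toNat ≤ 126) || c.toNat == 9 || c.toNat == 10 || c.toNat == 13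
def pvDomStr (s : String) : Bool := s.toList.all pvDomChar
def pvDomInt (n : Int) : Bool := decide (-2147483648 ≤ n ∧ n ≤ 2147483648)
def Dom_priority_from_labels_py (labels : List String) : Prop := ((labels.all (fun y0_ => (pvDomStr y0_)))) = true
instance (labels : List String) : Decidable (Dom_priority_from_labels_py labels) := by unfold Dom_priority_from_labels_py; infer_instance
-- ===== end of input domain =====

-- B replaces A's set + tiered early-return membership cascade by one min-reduction over a
-- dict lookup per lowercased label (default 100); objective: simpler. Same return value.

-- ===== PORT A =====
def priority_from_labels_py (labels : List String) : Int :=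
  let lowered : PySem.Set String := PySem.Set.ofList (labels.map PySem.Str.lower)
  if PySem.Set.contains lowered "severity:critical" || PySem.Set.contains lowered "priority:p0" then 0
  else if PySem.Set.contains lowered "priority:p1" then 10
  else if PySem.Set.contains lowered "priority:p2" then 20
  else 100

-- ===== PORT B =====
def pvPriorityTable : PySem.Dict String Int :=
  PySem.Dict.ofList [("severity:critical", 0), ("priority:p0", 0), ("priority:p1", 10), ("priority:p2", 20)]

def priority_from_labels_py_alt (labels : List String) : Int :=
  labels.foldl (fun best label => min best (pvPriorityTable.getD (PySem.Str.lower label) 100)) 100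

-- ===== PRECONDITION & SPEC =====
def Spec_priority_from_labels_py (labels : List String) (out : Int) : Prop := out = priority_from_labels_py_alt labels
instance (labels : List String) (out : Int) : Decidable (Spec_priority_from_labels_py labels out) := by unfold Spec_priority_from_labels_py; infer_instance

-- ===== CLAIM (what is proved, stated in full; the proofs are below) =====
def Claim_equal_priority_from_labels_py : Prop := ∀ (labels : List String), Dom_priority_from_labels_py labels → Spec_priority_from_labels_py labels (priority_from_labels_py labels)

-- ===== LEMMAS AND PROOFS =====

-- the table lookup written out as a cascade of string tests (the dict's four literal keys)
lemma table_getD_eq (s : String) : pvPriorityTable.getD (PySem.Str.lower s) 100 =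
    (if PySem.Str.lower s == "severity:critical" then (0 : Int)
     else if PySem.Str.lower s == "priority:p0" then 0
     else if PySem.Str.lower s == "priority:p1" then 10
     else if PySem.Str.lower s == "priority:p2" then 20
     else 100) := by
  have h : pvPriorityTable.items = [("severity:critical", 0), ("priority:p0", 0), ("priority:p1", 10), ("priority:p2", 20)] := by rfl
  simp only [PySem.Dict.getD, PySem.Dict.get?, h, List.find?_cons, beq_iff_eq]
  split <;> split_ifs <;> simp_all <;>
  (try split) <;> simp_all <;> (try split) <;> simp_all <;> (try split) <;> simp_all

lemma table_getD_le_100 (s : String) : pvPriorityTable.getD (PySem.Str.lower s) 100 ≤ 100 := by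
  rw [table_getD_eq]; split_ifs <;> omega

-- pulling the accumulator out of B's min-fold (valid while the accumulator stays ≤ 100)
lemma foldl_min_shift (f : String → Int) (hf : ∀ s, f s ≤ 100) :
    ∀ (l : List String) (a : Int), a ≤ 100 →
      l.foldl (fun b x => min b (f x)) a = min a (l.foldl (fun b x => min b (f x)) 100) := by
  intro l
  induction l with
  | nil => intro a ha; simp; omega
  | cons x xs ih =>
    intro a ha
    simp only [List.foldl_cons]
    rw [ih (min a (f x)) (by omega), ih (min 100 (f x)) (by omega)]
    have := hf x
    omega

lemma alt_cons (x : String) (xs : List String) :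
    priority_from_labels_py_alt (x :: xs) =
      min (pvPriorityTable.getD (PySem.Str.lower x) 100) (priority_from_labels_py_alt xs) := by
  unfold priority_from_labels_py_alt
  simp only [List.foldl_cons]
  rw [foldl_min_shift (fun label => pvPriorityTable.getD (PySem.Str.lower label) 100)
        (fun s => table_getD_le_100 s) xs (min 100 (pvPriorityTable.getD (PySem.Str.lower x) 100))
        (by have := table_getD_le_100 x; omega)]
  have := table_getD_le_100 x
  omega

-- membership in A's set of lowered labels, as a scan over the labels
lemma contains_lowered (t : String) (labels : List String) :
    PySem.Set.contains (PySem.Set.ofList (labels.map PySem.Str.lower)) t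
      = labels.any (fun s => PySem.Str.lower s == t) := by
  rw [Bool.eq_iff_iff]
  simp [PySem.Set.contains, PySem.Set.mem_ofList]

lemma a_cons (x : String) (xs : List String) :
    priority_from_labels_py (x :: xs) =
      min (pvPriorityTable.getD (PySem.Str.lower x) 100) (priority_from_labels_py xs) := by
  unfold priority_from_labels_py
  simp only [contains_lowered, List.any_cons, table_getD_eq]
  by_cases h1 : PySem.Str.lower x == "severity:critical" <;>
  by_cases h2 : PySem.Str.lower x == "priority:p0" <;>
  by_cases h3 : PySem.Str.lower x == "priority:p1" <;>
  by_cases h4 : PySem.Str.lower x == "priority:p2" <;>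
    simp [h1, h2, h3, h4] <;> split_ifs <;> omega

lemma both_agree (labels : List String) :
    priority_from_labels_py labels = priority_from_labels_py_alt labels := by
  induction labels with
  | nil => rfl
  | cons x xs ih => rw [a_cons, alt_cons, ih]

-- ===== VERDICT (by name: the statement is the Claim_ definition above) =====
theorem priority_from_labels_py_spec : Claim_equal_priority_from_labels_py := by
  intro labels _
  unfold Spec_priority_from_labels_py
  exact both_agree labels
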